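-- pv_equiv track=rewrite | github.com/JaredBears/Formation-Python | MaxTickets.py | maxTickets
-- ===== SOURCE A (Python) =====
-- def maxTickets(tickets):
--     dp = {}
--     answer = 0
--     def buildSubsequence(idx, seq):
--         if idx >= len(tickets):
--             for num in seq:
--                 if num not in dp:
--                     dp[num] = len(seq)
--             return
--         if abs(tickets[idx] - seq[-1]) <= 1:
--             seq.append(tickets[idx])
--         buildSubsequence(idx + 1, seq)
--
--     tickets.sort()
--     for i, num in enumerate(tickets):
--         if num not in dp:
--             buildSubsequence(i + 1, [num])
--         answer = max(answer, dp[num])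
--     return answer
-- ===== SOURCE B (Python) =====
-- def maxTickets(tickets):
--     best = 0
--     cur = 0
--     prev = None
--     for x in sorted(tickets):
--         cur = cur + 1 if prev is not None and x - prev <= 1 else 1
--         best = max(best, cur)
--         prev = x
--     return best
-- ===== Notes on version B (the rewrite author's own statement) =====
-- stated objective: faster
-- what changed: A sorts and then, for each element not yet memoized, re-scans the remaining list with a recursive helper to build the run and fill a memo dict; B sorts once and computes the longest run of adjacent differences <= 1 in a single pass with a running counter, with no dict and no recursion.
import Mathlib
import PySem

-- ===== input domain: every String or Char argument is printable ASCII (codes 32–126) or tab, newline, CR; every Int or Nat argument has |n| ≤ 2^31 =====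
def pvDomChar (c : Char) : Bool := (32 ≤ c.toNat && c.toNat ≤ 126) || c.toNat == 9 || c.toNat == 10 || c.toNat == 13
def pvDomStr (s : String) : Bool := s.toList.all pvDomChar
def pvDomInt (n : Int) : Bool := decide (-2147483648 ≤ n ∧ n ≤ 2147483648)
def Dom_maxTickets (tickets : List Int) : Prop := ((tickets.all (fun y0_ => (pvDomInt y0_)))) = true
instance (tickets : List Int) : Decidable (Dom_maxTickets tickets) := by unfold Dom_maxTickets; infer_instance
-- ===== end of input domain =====

-- B replaces A's quadratic recursive run-building with a single sorted pass tracking the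
-- current run length (objective: faster). A sorts its argument in place; the equivalence
-- proved here is about the return value only (B does not mutate its argument).

-- ===== PORT A =====
-- buildSubsequence: seq is nonempty in every call (it starts as [num] and only grows),
-- so Python's seq[-1] is its last element; ported as seq.getLastD 0 (exact here).
def pvBuildSub (ts : List Int) (idx : Int) (seq : List Int) (dp : PySem.Dict Int Int) : PySem.Dict Int Int :=
  if (ts.length : Int) ≤ idx then
    seq.foldl (fun d num => if d.contains num then d else d.insert num (seq.length : Int)) dp
  else
    let x := PySem.List.pyGetD ts idx 0   -- tickets[idx]; 0 ≤ idx < len(tickets) in every call, exact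
    let seq' := if (x - seq.getLastD 0).natAbs ≤ 1 then seq ++ [x] else seq
    pvBuildSub ts (idx + 1) seq' dp
termination_by ((ts.length : Int) - idx).toNat
decreasing_by omega

def maxTickets (tickets : List Int) : Int :=
  let ts := PySem.List.sorted tickets (fun x => x) false
  -- dp[num] in the loop body: num is always a key of dp at that point
  -- (buildSubsequence inserts it when absent), so getD is exact there.
  let st := (PySem.List.enumerate ts 0).foldl
    (fun (st : PySem.Dict Int Int × Int) (p : Int × Int) =>
      let dp := if st.1.contains p.2 then st.1 else pvBuildSub ts (p.1 + 1) [p.2] st.1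
      (dp, max st.2 (dp.getD p.2 0)))
    (PySem.Dict.empty, 0)
  st.2

-- ===== PORT B =====
def maxTickets_alt (tickets : List Int) : Int :=
  let st := (PySem.List.sorted tickets (fun x => x) false).foldl
    (fun (st : Int × Int × Option Int) x =>
      let cur : Int := match st.2.2 with
        | some p => if x - p ≤ 1 then st.2.1 + 1 else 1
        | none => 1
      (max st.1 cur, cur, some x))
    (0, 0, none)
  st.1

-- ===== PRECONDITION & SPEC =====
def Spec_maxTickets (tickets : List Int) (out : Int) : Prop := out = maxTickets_alt tickets
instance (tickets : List Int) (out : Int) : Decidable (Spec_maxTickets tickets out) := by unfold Spec_maxTickets; infer_instance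

-- ===== CLAIM (what is proved, stated in full; the proofs are below) =====
def Claim_equal_maxTickets : Prop := ∀ (tickets : List Int), Dom_maxTickets tickets → Spec_maxTickets tickets (maxTickets tickets)

-- ===== LEMMAS AND PROOFS =====

-- splits a sorted list into the maximal first run (consecutive diffs ≤ 1 starting from p) and the rest
def runSplit (p : Int) : List Int → List Int × List Int
  | [] => ([], [])
  | x :: r => if x - p ≤ 1 then ((x :: (runSplit x r).1), (runSplit x r).2) else ([], x :: r)

def runLast (p : Int) (rest : List Int) : Int := (runSplit p rest).1.getLastD p

theorem runSplit_append (p : Int) (rest : List Int) :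
    (runSplit p rest).1 ++ (runSplit p rest).2 = rest := by
  induction rest generalizing p with
  | nil => simp [runSplit]
  | cons x r ih =>
    by_cases h : x - p ≤ 1
    · simp [runSplit, h, ih x]
    · simp [runSplit, h]

theorem runSplit_snd_length (p : Int) (rest : List Int) :
    (runSplit p rest).2.length ≤ rest.length := by
  have := congrArg List.length (runSplit_append p rest)
  simp at this; omega

-- maximum run length over the segments of a sorted list
def segMax : List Int → Int → Int
  | [], ans => ans
  | x :: r, ans => segMax (runSplit x r).2 (max ans (1 + ((runSplit x r).1.length : Int)))
termination_by s => s.length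
decreasing_by
  have := runSplit_snd_length x r
  simp; omega

-- pure model of buildSubsequence's growth of seq
def grow : List Int → List Int → List Int
  | [], seq => seq
  | x :: r, seq => grow r (if (x - seq.getLastD 0).natAbs ≤ 1 then seq ++ [x] else seq)

-- pure model of buildSubsequence's final insertion loop
def pvFinal (L : Int) (seq : List Int) (dp : PySem.Dict Int Int) : PySem.Dict Int Int :=
  seq.foldl (fun d num => if d.contains num then d else d.insert num L) dp

theorem buildSub_eq (ts : List Int) (idx : Int) (seq : List Int) (dp : PySem.Dict Int Int)
    (h0 : 0 ≤ idx) :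
    pvBuildSub ts idx seq dp =
      pvFinal ((grow (ts.drop idx.toNat) seq).length : Int) (grow (ts.drop idx.toNat) seq) dp := by
  rw [pvBuildSub]
  split
  · rename_i hle
    have hd : ts.drop idx.toNat = [] := by
      apply List.drop_eq_nil_of_le; omega
    rw [hd]
    rfl
  · rename_i hlt
    have hx : PySem.List.pyGetD ts idx 0 = ts[idx.toNat] :=
      PySem.List.pyGetD_eq_getElem ts 0 h0 (by omega)
    have hd : ts.drop idx.toNat = ts[idx.toNat] :: ts.drop (idx.toNat + 1) :=
      List.drop_eq_getElem_cons (by omega)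
    have hn : (idx + 1).toNat = idx.toNat + 1 := by omega
    rw [buildSub_eq ts (idx + 1) _ dp (by omega), hn, hd, grow, hx]
termination_by ((ts.length : Int) - idx).toNat
decreasing_by omega

theorem grow_skip (rest : List Int) : ∀ (seq : List Int) (p : Int), seq.getLastD 0 = p →
    (∀ y ∈ rest, p + 1 < y) → grow rest seq = seq := by
  induction rest with
  | nil => intro seq p _ _; rfl
  | cons x r ih =>
    intro seq p hl hall
    have hx := hall x (by simp)
    rw [grow, if_neg (by rw [hl]; omega)]
    exact ih seq p hl (fun y hy => hall y (by simp [hy]))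

theorem grow_run (rest : List Int) : ∀ (seq : List Int) (p : Int), seq.getLastD 0 = p →
    List.Pairwise (· ≤ ·) (p :: rest) → grow rest seq = seq ++ (runSplit p rest).1 := by
  induction rest with
  | nil => intro seq p _ _; simp [runSplit, grow]
  | cons x r ih =>
    intro seq p hl hp
    have hpx : p ≤ x := (List.pairwise_cons.mp hp).1 x (by simp)
    have hxr : List.Pairwise (· ≤ ·) (x :: r) := (List.pairwise_cons.mp hp).2
    by_cases h : x - p ≤ 1
    · rw [grow, if_pos (by rw [hl]; omega)]
      rw [ih (seq ++ [x]) x (by simp) hxr]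
      simp [runSplit, h]
    · rw [grow, if_neg (by rw [hl]; omega)]
      have hall : ∀ y ∈ x :: r, p + 1 < y := by
        intro y hy
        rcases List.mem_cons.mp hy with h1 | h1
        · omega
        · have := (List.pairwise_cons.mp hxr).1 y h1; omega
      rw [grow_skip r seq p hl (fun y hy => hall y (by simp [hy]))]
      simp [runSplit, h]

theorem pvFinal_cons (L x : Int) (xs : List Int) (dp : PySem.Dict Int Int) :
    pvFinal L (x :: xs) dp = pvFinal L xs (if dp.contains x = true then dp else dp.insert x L) := rfl

theorem pvFinal_get?_of_contains (L : Int) (seq : List Int) :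
    ∀ (dp : PySem.Dict Int Int) (k : Int), dp.contains k = true →
      (pvFinal L seq dp).get? k = dp.get? k := by
  induction seq with
  | nil => intro dp k _; rfl
  | cons x xs ih =>
    intro dp k hk
    rw [pvFinal_cons]
    by_cases hx : dp.contains x = true
    · rw [if_pos hx]; exact ih dp k hk
    · rw [if_neg hx]
      rw [ih (dp.insert x L) k (by rw [PySem.Dict.contains_insert]; simp [hk])]
      rcases eq_or_ne k x with h | h
      · subst h; simp [hk] at hx
      · exact PySem.Dict.get?_insert_of_ne dp L h

theorem pvFinal_get?_of_mem (L : Int) (seq : List Int) :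
    ∀ (dp : PySem.Dict Int Int) (k : Int), dp.contains k = false → k ∈ seq →
      (pvFinal L seq dp).get? k = some L := by
  induction seq with
  | nil => intro dp k _ h; simp at h
  | cons x xs ih =>
    intro dp k hk hmem
    rw [pvFinal_cons]
    rcases List.mem_cons.mp hmem with h | h
    · subst h
      rw [if_neg (by simp [hk])]
      rw [pvFinal_get?_of_contains L xs (dp.insert k L) k
            (by rw [PySem.Dict.contains_insert]; simp)]
      exact PySem.Dict.get?_insert_self dp k L
    · by_cases hx : dp.contains x = true
      · rw [if_pos hx]; exact ih dp k hk h
      · rw [if_neg hx]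
        by_cases hkx : k = x
        · subst hkx
          rw [pvFinal_get?_of_contains L xs (dp.insert k L) k
                (by rw [PySem.Dict.contains_insert]; simp)]
          exact PySem.Dict.get?_insert_self dp k L
        · exact ih (dp.insert x L) k
            (by rw [PySem.Dict.contains_insert]; simp [hk, hkx]) h

theorem pvFinal_contains (L : Int) (seq : List Int) :
    ∀ (dp : PySem.Dict Int Int) (k : Int),
      (pvFinal L seq dp).contains k = true ↔ dp.contains k = true ∨ k ∈ seq := by
  induction seq with
  | nil => intro dp k; simp [pvFinal]
  | cons x xs ih =>
    intro dp k
    rw [pvFinal_cons]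
    by_cases hx : dp.contains x = true
    · rw [if_pos hx, ih dp k]
      constructor
      · rintro (h | h)
        · exact Or.inl h
        · exact Or.inr (by simp [h])
      · rintro (h | h)
        · exact Or.inl h
        · rcases List.mem_cons.mp h with h1 | h1
          · subst h1; exact Or.inl hx
          · exact Or.inr h1
    · rw [if_neg hx, ih (dp.insert x L) k, PySem.Dict.contains_insert]
      constructor
      · rintro (h | h)
        · rcases Bool.or_eq_true_iff.mp h with h1 | h1
          · exact Or.inr (by simp [eq_of_beq h1])
          · exact Or.inl h1
        · exact Or.inr (by simp [h])
      · rintro (h | h)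
        · exact Or.inl (by simp [h])
        · rcases List.mem_cons.mp h with h1 | h1
          · subst h1; exact Or.inl (by simp)
          · exact Or.inr h1

-- pure model of A's main loop
def modelLoop : List Int → PySem.Dict Int Int → Int → Int
  | [], _, ans => ans
  | num :: rest, dp, ans =>
      let dp' := if dp.contains num then dp
                 else pvFinal (((num :: (runSplit num rest).1).length : Int)) (num :: (runSplit num rest).1) dp
      modelLoop rest dp' (max ans (dp'.getD num 0))

def InvKeys (dp : PySem.Dict Int Int) (l : List Int) : Prop :=
  ∀ k, dp.contains k = true → ∀ z ∈ l, k < z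

theorem foldA_eq_model (ts : List Int) (hs : List.Pairwise (· ≤ ·) ts) :
    ∀ (rest : List Int) (j : Nat), ts.drop j = rest → ∀ dp ans,
      ((PySem.List.enumerate rest (j : Int)).foldl
        (fun (st : PySem.Dict Int Int × Int) (p : Int × Int) =>
          let dp := if st.1.contains p.2 then st.1 else pvBuildSub ts (p.1 + 1) [p.2] st.1
          (dp, max st.2 (dp.getD p.2 0)))
        (dp, ans)).2 = modelLoop rest dp ans := by
  intro rest
  induction rest with
  | nil =>
    intro j _ dp ans
    simp [PySem.List.enumerate, modelLoop]
  | cons num rest' ih =>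
    intro j hd dp ans
    have hdrop1 : ts.drop (j + 1) = rest' := by
      rw [← List.tail_drop, hd]; rfl
    have hsub : List.Sublist (num :: rest') ts := hd ▸ List.drop_sublist j ts
    have hp : List.Pairwise (· ≤ ·) (num :: rest') := hs.sublist hsub
    have hbs : pvBuildSub ts ((j : Int) + 1) [num] dp =
        pvFinal (((num :: (runSplit num rest').1).length : Int)) (num :: (runSplit num rest').1) dp := by
      have hc : ((j : Int) + 1) = ((j + 1 : Nat) : Int) := by push_cast; ring
      have hg : grow (ts.drop ((j : Int) + 1).toNat) [num] = num :: (runSplit num rest').1 := by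
        have ht : ((j : Int) + 1).toNat = j + 1 := by omega
        rw [ht, hdrop1, grow_run rest' [num] num (by simp) hp]
        simp
      rw [buildSub_eq ts ((j : Int) + 1) [num] dp (by omega), hg]
    rw [PySem.List.enumerate_cons, List.foldl_cons, modelLoop]
    simp only [hbs]
    exact ih (j + 1) hdrop1 _ _

theorem run_le_last (rest : List Int) : ∀ (p : Int), List.Pairwise (· ≤ ·) (p :: rest) →
    ∀ x ∈ p :: (runSplit p rest).1, x ≤ runLast p rest := by
  induction rest with
  | nil => intro p _ x hx; simp [runSplit] at hx; simp [runLast, runSplit, hx]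
  | cons y r ih =>
    intro p hp x hx
    have hpy : p ≤ y := (List.pairwise_cons.mp hp).1 y (by simp)
    have hyr : List.Pairwise (· ≤ ·) (y :: r) := (List.pairwise_cons.mp hp).2
    by_cases h : y - p ≤ 1
    · have hL : runLast p (y :: r) = runLast y r := by
        simp only [runLast, runSplit, if_pos h]
        exact List.getLastD_cons
      rw [hL]
      rcases List.mem_cons.mp hx with h1 | h1
      · subst h1
        calc x ≤ y := hpy
          _ ≤ runLast y r := ih y hyr y (by simp)
      · simp only [runSplit, if_pos h] at h1
        exact ih y hyr x h1
    · simp [runSplit, h] at hx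
      simp [runLast, runSplit, h, hx]

theorem last_lt_rest (rest : List Int) : ∀ (p : Int), List.Pairwise (· ≤ ·) (p :: rest) →
    ∀ z ∈ (runSplit p rest).2, runLast p rest + 1 < z := by
  induction rest with
  | nil => intro p _ z hz; simp [runSplit] at hz
  | cons y r ih =>
    intro p hp z hz
    have hyr : List.Pairwise (· ≤ ·) (y :: r) := (List.pairwise_cons.mp hp).2
    by_cases h : y - p ≤ 1
    · have hL : runLast p (y :: r) = runLast y r := by
        simp only [runLast, runSplit, if_pos h]
        exact List.getLastD_cons
      rw [hL]
      simp only [runSplit, if_pos h] at hz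
      exact ih y hyr z hz
    · simp only [runSplit, if_neg h] at hz
      have hLp : runLast p (y :: r) = p := by
        simp only [runLast, runSplit, if_neg h]; rfl
      rw [hLp]
      rcases List.mem_cons.mp hz with h1 | h1
      · omega
      · have := (List.pairwise_cons.mp hyr).1 z h1; omega

theorem skip_run (t : List Int) (ans : Int) : ∀ (a : List Int) (dp : PySem.Dict Int Int),
    (∀ x ∈ a, dp.contains x = true ∧ dp.getD x 0 ≤ ans) →
    modelLoop (a ++ t) dp ans = modelLoop t dp ans := by
  intro a
  induction a with
  | nil => intro dp _; simp
  | cons x a' ih =>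
    intro dp hx
    have h1 := (hx x (by simp)).1
    have h2 := (hx x (by simp)).2
    rw [List.cons_append, modelLoop]
    simp only [h1, if_true]
    rw [max_eq_left h2]
    exact ih dp (fun y hy => hx y (by simp [hy]))

theorem model_eq_seg (s : List Int) (dp : PySem.Dict Int Int) (ans : Int)
    (hs : List.Pairwise (· ≤ ·) s) (hinv : InvKeys dp s) :
    modelLoop s dp ans = segMax s ans := by
  match s with
  | [] => simp [modelLoop, segMax]
  | num :: rest =>
    have hnc : dp.contains num = false := by
      cases hB : dp.contains num with
      | false => rfl
      | true => exact absurd (hinv num hB num (by simp)) (lt_irrefl num)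
    have hsplit := runSplit_append num rest
    have hmemrest : ∀ x ∈ (runSplit num rest).1, x ∈ rest := by
      intro x hx; rw [← hsplit]; exact List.mem_append_left _ hx
    have hmemt : ∀ z ∈ (runSplit num rest).2, z ∈ rest := by
      intro z hz; rw [← hsplit]; exact List.mem_append_right _ hz
    have hfresh : ∀ x ∈ num :: (runSplit num rest).1, dp.contains x = false := by
      intro x hx
      rcases List.mem_cons.mp hx with h1 | h1
      · subst h1; exact hnc
      · cases hB : dp.contains x with
        | false => rfl
        | true => exact absurd (hinv x hB x (by simp [hmemrest x h1])) (lt_irrefl x)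
    set L : Int := ((num :: (runSplit num rest).1).length : Int) with hLdef
    set dp' := pvFinal L (num :: (runSplit num rest).1) dp with hdp'
    have hget : ∀ x ∈ num :: (runSplit num rest).1, dp'.getD x 0 = L := by
      intro x hx
      rw [hdp', PySem.Dict.getD_eq_get?_getD,
        pvFinal_get?_of_mem L (num :: (runSplit num rest).1) dp x (hfresh x hx) hx]
      rfl
    rw [modelLoop]
    simp only [hnc, Bool.false_eq_true, if_false, ← hLdef, ← hdp']
    rw [hget num (by simp)]
    rw [segMax]
    conv_lhs => rw [← hsplit]
    rw [skip_run (runSplit num rest).2 (max ans L) (runSplit num rest).1 dp'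
      (by
        intro x hx
        refine ⟨?_, ?_⟩
        · rw [hdp']
          exact (pvFinal_contains L _ dp x).mpr (Or.inr (by simp [hx]))
        · rw [hget x (by simp [hx])]
          exact le_max_right _ _)]
    have hpt : List.Pairwise (· ≤ ·) (runSplit num rest).2 := by
      have hsub : List.Sublist (runSplit num rest).2 rest := by
        nth_rewrite 2 [← hsplit]
        exact List.sublist_append_right _ _
      exact List.Pairwise.sublist (hsub.trans (List.sublist_cons_self _ _)) hs
    have hinv' : InvKeys dp' (runSplit num rest).2 := by
      intro k hk z hz
      rcases (pvFinal_contains L _ dp k).mp (hdp' ▸ hk) with h1 | h1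
      · exact hinv k h1 z (by simp [hmemt z hz])
      · have h2 : k ≤ runLast num rest := run_le_last rest num hs k h1
        have h3 : runLast num rest + 1 < z := last_lt_rest rest num hs z hz
        omega
    rw [model_eq_seg (runSplit num rest).2 dp' (max ans L) hpt hinv']
    congr 1
    congr 1
    rw [hLdef]
    push_cast [List.length_cons]
    ring
termination_by s.length
decreasing_by
  have := runSplit_snd_length num rest
  simp
  omega

-- B's loop step
def bstep (st : Int × Int × Option Int) (x : Int) : Int × Int × Option Int :=
  let cur : Int := match st.2.2 with
    | some p => if x - p ≤ 1 then st.2.1 + 1 else 1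
    | none => 1
  (max st.1 cur, cur, some x)

theorem bfold_run (rest : List Int) : ∀ (p b c : Int), List.Pairwise (· ≤ ·) (p :: rest) → c ≤ b →
    rest.foldl bstep (b, c, some p) =
      (runSplit p rest).2.foldl bstep
        (max b (c + ((runSplit p rest).1.length : Int)),
         c + ((runSplit p rest).1.length : Int), some (runLast p rest)) := by
  induction rest with
  | nil =>
    intro p b c _ hcb
    simp [runSplit, runLast]
    exact hcb
  | cons x r ih =>
    intro p b c hp hcb
    have hpx : p ≤ x := (List.pairwise_cons.mp hp).1 x (by simp)
    have hxr : List.Pairwise (· ≤ ·) (x :: r) := (List.pairwise_cons.mp hp).2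
    by_cases h : x - p ≤ 1
    · rw [List.foldl_cons]
      have hb : bstep (b, c, some p) x = (max b (c + 1), c + 1, some x) := by
        simp [bstep, h]
      rw [hb, ih x (max b (c + 1)) (c + 1) hxr (le_max_right _ _)]
      have e1 : (runSplit p (x :: r)).2 = (runSplit x r).2 := by simp [runSplit, h]
      have e2 : (runSplit p (x :: r)).1 = x :: (runSplit x r).1 := by simp [runSplit, h]
      have e3 : runLast p (x :: r) = runLast x r := by
        simp only [runLast, runSplit, if_pos h]
        exact List.getLastD_cons
      rw [e1, e2, e3]
      have e4 : max (max b (c + 1)) (c + 1 + ((runSplit x r).1.length : Int)) =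
          max b (c + ((x :: (runSplit x r).1).length : Int)) := by
        rw [max_assoc]
        rw [show max (c + 1) (c + 1 + ((runSplit x r).1.length : Int)) = c + 1 + ((runSplit x r).1.length : Int) from
          max_eq_right (le_add_of_nonneg_right (Int.natCast_nonneg _))]
        congr 1
        push_cast [List.length_cons]
        ring
      have e5 : c + 1 + ((runSplit x r).1.length : Int) =
          c + ((x :: (runSplit x r).1).length : Int) := by
        push_cast [List.length_cons]; ring
      rw [e4, e5]
    · have e1 : (runSplit p (x :: r)) = ([], x :: r) := by simp [runSplit, h]
      have hrl : runLast p (x :: r) = p := by simp [runLast, e1]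
      rw [e1, hrl]
      simp only [List.length_nil, Nat.cast_zero, add_zero]
      rw [max_eq_left hcb]

theorem bfold_main (s : List Int) (b c : Int) (prev : Option Int)
    (hs : List.Pairwise (· ≤ ·) s)
    (hprev : prev = none ∨ ∃ p, prev = some p ∧ ∀ z ∈ s, p + 1 < z) :
    (s.foldl bstep (b, c, prev)).1 = segMax s b := by
  match s with
  | [] => simp [segMax]
  | x :: r =>
    have hcur : bstep (b, c, prev) x = (max b 1, 1, some x) := by
      rcases hprev with h | ⟨p, hp, hall⟩
      · subst h; simp [bstep]
      · subst hp
        have := hall x (by simp)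
        simp [bstep, show ¬ (x - p ≤ 1) by omega]
    have hxr : List.Pairwise (· ≤ ·) (x :: r) := hs
    rw [List.foldl_cons, hcur,
      bfold_run r x (max b 1) 1 hxr (le_max_right _ _)]
    have hpt : List.Pairwise (· ≤ ·) (runSplit x r).2 := by
      have hsub : List.Sublist (runSplit x r).2 r := by
        nth_rewrite 2 [← runSplit_append x r]
        exact List.sublist_append_right _ _
      exact List.Pairwise.sublist (hsub.trans (List.sublist_cons_self _ _)) hs
    rw [bfold_main (runSplit x r).2 _ _ _ hpt
      (Or.inr ⟨runLast x r, rfl, fun z hz => last_lt_rest r x hxr z hz⟩)]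
    rw [segMax]
    have e : max (max b 1) (1 + ((runSplit x r).1.length : Int)) =
        max b (1 + ((runSplit x r).1.length : Int)) := by
      rw [max_assoc]
      rw [show max (1:Int) (1 + ((runSplit x r).1.length : Int)) = 1 + ((runSplit x r).1.length : Int) from
        max_eq_right (le_add_of_nonneg_right (Int.natCast_nonneg _))]
    rw [e]
termination_by s.length
decreasing_by
  have := runSplit_snd_length x r
  simp
  omega

-- ===== VERDICT (by name: the statement is the Claim_ definition above) =====
theorem maxTickets_spec : Claim_equal_maxTickets := by
  intro tickets _
  unfold Spec_maxTickets maxTickets maxTickets_alt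
  set ts := PySem.List.sorted tickets (fun x => x) false with hts
  have hp : List.Pairwise (· ≤ ·) ts := PySem.List.sorted_pairwise tickets (fun x => x)
  have hA := foldA_eq_model ts hp ts 0 (by simp) PySem.Dict.empty 0
  simp only [Nat.cast_zero] at hA
  rw [hA]
  rw [model_eq_seg ts PySem.Dict.empty 0 hp
    (by intro k hk z _; rw [PySem.Dict.contains_empty] at hk; exact absurd hk (by simp))]
  have hB := bfold_main ts 0 0 none hp (Or.inl rfl)
  exact hB.symm
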